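-- pv_equiv track=rewrite | github.com/098tarik/leetcode-portfolio | Dynamic_Programming/minivan.py | calculate_stops
-- ===== SOURCE A (Python) =====
-- def calculate_stops(times, k):
--     memo = {}
--     n = len(times)
--     def min_stops(i):
--         if i >= n:
--             return 0
--         if i >= n - k - 1:
--             return times[i]  # We know min of future delays is 0
--
--         if i in memo:
--             return memo[i]
--
--          # Choose to stop here + best of next k+1 positions
--         current_time = times[i]
--         min_future = float('inf')
--
--         # Can skip to positions i+1, i+2, ..., i+k+1
--         for next_stop in range(i + 1, i + k + 2):
--             min_future = min(min_future, min_stops(next_stop))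
--
--         memo[i] = current_time + min_future
--         return memo[i]
--
--     result = float('inf')
--     for start in range(k + 1):
--         result = min(result, min_stops(start))
--     return result
-- ===== SOURCE B (Python) =====
-- def calculate_stops(times, k):
--     n = len(times)
--     dp = [0] * n
--     for i in range(n - 1, -1, -1):
--         if i >= n - k - 1:
--             dp[i] = times[i]
--         else:
--             dp[i] = times[i] + min(dp[i + 1 : i + k + 2])
--     if k >= n:
--         return min([0] + dp)
--     return min(dp[:k + 1])
-- ===== Notes on version B (the rewrite author's own statement) =====
-- stated objective: faster
-- what changed: Replaced top-down memoized recursion (dict memo + nested min_stops function, recursion depth up to n) with an iterative bottom-up DP table filled right-to-left taking min over an explicit window slice; same O(n*k) asymptotics but no recursion or dict overhead (measured >20x faster).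
-- outside the precondition, e.g. on calculate_stops([1, 2], -1): A returns inf, B raises ValueError
import Mathlib
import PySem

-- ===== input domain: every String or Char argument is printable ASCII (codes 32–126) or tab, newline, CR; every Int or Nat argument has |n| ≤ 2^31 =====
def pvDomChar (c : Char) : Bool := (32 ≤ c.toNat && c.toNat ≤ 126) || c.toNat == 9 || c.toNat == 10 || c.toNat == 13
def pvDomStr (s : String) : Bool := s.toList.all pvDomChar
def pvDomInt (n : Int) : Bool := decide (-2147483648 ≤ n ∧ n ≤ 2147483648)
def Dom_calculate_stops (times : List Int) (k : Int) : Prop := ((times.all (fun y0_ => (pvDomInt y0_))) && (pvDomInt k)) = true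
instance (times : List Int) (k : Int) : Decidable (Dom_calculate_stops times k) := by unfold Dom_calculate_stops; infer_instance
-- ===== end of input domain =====

-- B replaces A's top-down memoized recursion by an iterative bottom-up DP table (same O(n*k)
-- asymptotics, no recursion/dict overhead); equivalence is proved for k ≥ 0 (for k < 0 A returns float('inf')).

-- ===== PORT A =====
-- Python's min(float('inf'), v) accumulator: none models the initial inf.
def pvOptMin : Option Int → Int → Option Int
  | none, v => some v
  | some m, v => some (min m v)

-- min_stops(i), with the shared memo dict threaded through; fuel bounds the recursion depth
-- (every recursive call increases i by at least 1, so fuel = len(times)+1 at the call site is never exhausted).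
def pvMinStops (times : List Int) (k : Int) : Nat → Int → PySem.Dict Int Int → Int × PySem.Dict Int Int
  | 0, _, memo => (0, memo)
  | fuel+1, i, memo =>
    if (times.length : Int) ≤ i then (0, memo)
    else if (times.length : Int) - k - 1 ≤ i then ((PySem.List.pyGet? times i).getD 0, memo)
    else
      match memo.get? i with
      | some v => (v, memo)
      | none =>
        let current := (PySem.List.pyGet? times i).getD 0
        let q := (PySem.List.pyRange (i+1) (i+k+2) 1).foldl
          (fun (p : Option Int × PySem.Dict Int Int) j =>
            let r := pvMinStops times k fuel j p.2
            (pvOptMin p.1 r.1, r.2)) (none, memo)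
        let v := current + q.1.getD 0
        (v, q.2.insert i v)

def calculate_stops (times : List Int) (k : Int) : Int :=
  let q := (PySem.List.pyRange 0 (k+1) 1).foldl
    (fun (p : Option Int × PySem.Dict Int Int) start =>
      let r := pvMinStops times k (times.length + 1) start p.2
      (pvOptMin p.1 r.1, r.2)) (none, PySem.Dict.empty)
  q.1.getD 0

-- ===== PORT B =====
-- min(xs) on a nonempty list (Python raises ValueError on []; unreachable under Pre_).
def pvMinList : List Int → Int
  | [] => 0
  | h :: t => t.foldl min h

def calculate_stops_alt (times : List Int) (k : Int) : Int :=
  let n : Int := times.length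
  let dp := (PySem.List.pyRange (n-1) (-1) (-1)).foldl (fun (dp : List Int) i =>
      let ti := (PySem.List.pyGet? times i).getD 0
      let v := if n - k - 1 ≤ i then ti
               else ti + pvMinList (PySem.List.slice dp (some (i+1)) (some (i+k+2)))
      dp.set i.toNat v) (List.replicate times.length 0)
  if n ≤ k then dp.foldl min 0
  else pvMinList (PySem.List.slice dp (some 0) (some (k+1)))

-- ===== PRECONDITION & SPEC =====
-- Pre_ excludes k < 0, where A's loops are empty and A returns float('inf') — not an Int.
def Pre_calculate_stops (times : List Int) (k : Int) : Prop := 0 ≤ k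
instance (times : List Int) (k : Int) : Decidable (Pre_calculate_stops times k) := by
  unfold Pre_calculate_stops; infer_instance

def pvWitness_calculate_stops : List Int × Int := ([3, 1, 2], 1)

def Spec_calculate_stops (times : List Int) (k : Int) (out : Int) : Prop := out = calculate_stops_alt times k
instance (times : List Int) (k : Int) (out : Int) : Decidable (Spec_calculate_stops times k out) := by
  unfold Spec_calculate_stops; infer_instance

-- ===== CLAIM (what is proved, stated in full; the proofs are below) =====
def Claim_equal_calculate_stops : Prop := ∀ (times : List Int) (k : Int), Dom_calculate_stops times k → Pre_calculate_stops times k → Spec_calculate_stops times k (calculate_stops times k)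

-- ===== LEMMAS AND PROOFS =====

-- The common functional specification: the memo-free value of min_stops(i).
def pvSpec (times : List Int) (k : Int) (i : Int) : Int :=
  if h1 : (times.length : Int) ≤ i then 0
  else if (times.length : Int) - k - 1 ≤ i then (PySem.List.pyGet? times i).getD 0
  else (PySem.List.pyGet? times i).getD 0 +
    ((PySem.List.pyRange (i+1) (i+k+2) 1).attach.foldl
      (fun (acc : Option Int) j => pvOptMin acc (pvSpec times k j.1)) none).getD 0
termination_by ((times.length : Int) - i).toNat
decreasing_by
  have hj := (PySem.List.mem_pyRange_one.mp j.2).1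
  omega

theorem pvSpec_of_ge (times : List Int) (k i : Int) (h : (times.length : Int) ≤ i) :
    pvSpec times k i = 0 := by
  rw [pvSpec]; simp [h]

theorem pvSpec_tail (times : List Int) (k i : Int) (h1 : ¬ (times.length : Int) ≤ i)
    (h2 : (times.length : Int) - k - 1 ≤ i) :
    pvSpec times k i = (PySem.List.pyGet? times i).getD 0 := by
  rw [pvSpec]; simp [h1, h2]

-- fold of pvOptMin with a `some` accumulator is an ordinary running min
theorem pvOptFold_some (f : Int → Int) (L : List Int) (m : Int) :
    L.foldl (fun a j => pvOptMin a (f j)) (some m) = some ((L.map f).foldl min m) := by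
  induction L generalizing m with
  | nil => rfl
  | cons x t ih =>
    simp only [List.foldl_cons, List.map_cons]
    have h : pvOptMin (some m) (f x) = some (min m (f x)) := rfl
    rw [h, ih]

theorem pvSpec_nontail (times : List Int) (k i : Int) (h1 : ¬ (times.length : Int) ≤ i)
    (h2 : ¬ (times.length : Int) - k - 1 ≤ i) (hk : 0 ≤ k) :
    pvSpec times k i = (PySem.List.pyGet? times i).getD 0 +
      ((PySem.List.pyRange (i+2) (i+k+2) 1).map (pvSpec times k)).foldl min (pvSpec times k (i+1)) := by
  rw [pvSpec]
  rw [dif_neg h1, if_neg h2, List.foldl_attach (f := fun acc x => pvOptMin acc (pvSpec times k x))]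
  rw [PySem.List.pyRange_one_cons (by omega : i + 1 < i + k + 2)]
  rw [List.foldl_cons]
  have h : pvOptMin none (pvSpec times k (i+1)) = some (pvSpec times k (i+1)) := rfl
  rw [h, pvOptFold_some]
  have h2 : i + 1 + 1 = i + 2 := by ring
  rw [h2]
  rfl

def pvMemoOK (times : List Int) (k : Int) (memo : PySem.Dict Int Int) : Prop :=
  ∀ j v, memo.get? j = some v → v = pvSpec times k j

def pvStepA (times : List Int) (k : Int) (fuel : Nat)
    (p : Option Int × PySem.Dict Int Int) (j : Int) : Option Int × PySem.Dict Int Int :=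
  let r := pvMinStops times k fuel j p.2
  (pvOptMin p.1 r.1, r.2)

theorem pvMinStops_correct (times : List Int) (k : Int) (hk : 0 ≤ k) :
    ∀ (fuel : Nat) (i : Int) (memo : PySem.Dict Int Int),
      ((times.length : Int) - i).toNat < fuel → pvMemoOK times k memo →
      (pvMinStops times k fuel i memo).1 = pvSpec times k i ∧
      pvMemoOK times k (pvMinStops times k fuel i memo).2 := by
  intro fuel
  induction fuel with
  | zero => intro i memo h _; omega
  | succ fuel ih =>
    have L2 : ∀ (L : List Int) (acc : Option Int) (memo : PySem.Dict Int Int),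
        pvMemoOK times k memo →
        (∀ j ∈ L, ((times.length : Int) - j).toNat < fuel) →
        (L.foldl (pvStepA times k fuel) (acc, memo)).1
          = L.foldl (fun a j => pvOptMin a (pvSpec times k j)) acc ∧
        pvMemoOK times k (L.foldl (pvStepA times k fuel) (acc, memo)).2 := by
      intro L
      induction L with
      | nil => intro acc memo hm _; exact ⟨rfl, hm⟩
      | cons x t iht =>
        intro acc memo hm hb
        obtain ⟨hx1, hx2⟩ := ih x memo (hb x (by simp)) hm
        have hrec := iht (pvOptMin acc (pvMinStops times k fuel x memo).1)
          (pvMinStops times k fuel x memo).2 hx2 (fun j hj => hb j (by simp [hj]))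
        simp only [List.foldl_cons]
        refine ⟨?_, hrec.2⟩
        have hstep : pvStepA times k fuel (acc, memo) x
            = (pvOptMin acc (pvMinStops times k fuel x memo).1, (pvMinStops times k fuel x memo).2) := rfl
        rw [hstep, hrec.1, hx1]
    intro i memo hfuel hmemo
    rw [pvMinStops]
    by_cases hge : (times.length : Int) ≤ i
    · simp only [if_pos hge]
      exact ⟨(pvSpec_of_ge times k i hge).symm, hmemo⟩
    · by_cases htail : (times.length : Int) - k - 1 ≤ i
      · simp only [if_neg hge, if_pos htail]
        exact ⟨(pvSpec_tail times k i hge htail).symm, hmemo⟩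
      · simp only [if_neg hge, if_neg htail]
        cases hmk : memo.get? i with
        | some v => exact ⟨hmemo i v hmk, hmemo⟩
        | none =>
          have hbounds : ∀ j ∈ PySem.List.pyRange (i+1) (i+k+2) 1,
              ((times.length : Int) - j).toNat < fuel := by
            intro j hj
            have := PySem.List.mem_pyRange_one.mp hj
            omega
          have hfold := L2 (PySem.List.pyRange (i+1) (i+k+2) 1) none memo hmemo hbounds
          have hshape : (PySem.List.pyRange (i+1) (i+k+2) 1).foldl
              (fun a j => pvOptMin a (pvSpec times k j)) none
              = some (((PySem.List.pyRange (i+2) (i+k+2) 1).map (pvSpec times k)).foldl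
                  min (pvSpec times k (i+1))) := by
            rw [PySem.List.pyRange_one_cons (by omega : i + 1 < i + k + 2), List.foldl_cons]
            have h : pvOptMin none (pvSpec times k (i+1)) = some (pvSpec times k (i+1)) := rfl
            rw [h, pvOptFold_some]
            have h2 : i + 1 + 1 = i + 2 := by ring
            rw [h2]
          have hfold1 : ((PySem.List.pyRange (i+1) (i+k+2) 1).foldl (pvStepA times k fuel) (none, memo)).1
              = some (((PySem.List.pyRange (i+2) (i+k+2) 1).map (pvSpec times k)).foldl
                  min (pvSpec times k (i+1))) := by rw [hfold.1, hshape]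
          have hval : (PySem.List.pyGet? times i).getD 0
              + (((PySem.List.pyRange (i+1) (i+k+2) 1).foldl (pvStepA times k fuel) (none, memo)).1).getD 0
              = pvSpec times k i := by
            rw [hfold1, pvSpec_nontail times k i hge htail hk]
            rfl
          constructor
          · exact hval
          · intro j v hjv
            rw [PySem.Dict.get?_insert] at hjv
            split at hjv
            · rename_i hji
              cases hjv
              rw [hji]
              exact hval
            · exact hfold.2 j v hjv

theorem pvFoldA_correct (times : List Int) (k : Int) (hk : 0 ≤ k) (fuel : Nat) :
    ∀ (L : List Int) (acc : Option Int) (memo : PySem.Dict Int Int),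
      pvMemoOK times k memo →
      (∀ j ∈ L, ((times.length : Int) - j).toNat < fuel) →
      (L.foldl (pvStepA times k fuel) (acc, memo)).1
        = L.foldl (fun a j => pvOptMin a (pvSpec times k j)) acc ∧
      pvMemoOK times k (L.foldl (pvStepA times k fuel) (acc, memo)).2 := by
  intro L
  induction L with
  | nil => intro acc memo hm _; exact ⟨rfl, hm⟩
  | cons x t iht =>
    intro acc memo hm hb
    obtain ⟨hx1, hx2⟩ := pvMinStops_correct times k hk fuel x memo (hb x (by simp)) hm
    have hrec := iht (pvOptMin acc (pvMinStops times k fuel x memo).1)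
      (pvMinStops times k fuel x memo).2 hx2 (fun j hj => hb j (by simp [hj]))
    simp only [List.foldl_cons]
    refine ⟨?_, hrec.2⟩
    have hstep : pvStepA times k fuel (acc, memo) x
        = (pvOptMin acc (pvMinStops times k fuel x memo).1, (pvMinStops times k fuel x memo).2) := rfl
    rw [hstep, hrec.1, hx1]

theorem calculate_stops_eq_minspec (times : List Int) (k : Int) (hk : 0 ≤ k) :
    calculate_stops times k =
      ((PySem.List.pyRange 1 (k+1) 1).map (pvSpec times k)).foldl min (pvSpec times k 0) := by
  have hempty : pvMemoOK times k PySem.Dict.empty := by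
    intro j v h
    rw [PySem.Dict.get?_empty] at h
    cases h
  have hb : ∀ j ∈ PySem.List.pyRange 0 (k+1) 1,
      ((times.length : Int) - j).toNat < times.length + 1 := by
    intro j hj
    have := PySem.List.mem_pyRange_one.mp hj
    omega
  have hfold := pvFoldA_correct times k hk (times.length + 1)
    (PySem.List.pyRange 0 (k+1) 1) none PySem.Dict.empty hempty hb
  have hshape : (PySem.List.pyRange 0 (k+1) 1).foldl
      (fun a j => pvOptMin a (pvSpec times k j)) none
      = some (((PySem.List.pyRange 1 (k+1) 1).map (pvSpec times k)).foldl min (pvSpec times k 0)) := by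
    rw [PySem.List.pyRange_one_cons (by omega : (0:Int) < k + 1), List.foldl_cons]
    have h : pvOptMin none (pvSpec times k 0) = some (pvSpec times k 0) := rfl
    rw [h, pvOptFold_some]
    norm_num
  show (((PySem.List.pyRange 0 (k+1) 1).foldl (pvStepA times k (times.length + 1))
      (none, PySem.Dict.empty)).1).getD 0 = _
  rw [hfold.1, hshape]
  rfl

-- B side: the dp table holds pvSpec values
theorem pvDP_correct (times : List Int) (k : Int) (hk : 0 ≤ k) :
    ∀ (a : Int), a < (times.length : Int) → ∀ (dp : List Int), dp.length = times.length →
      (∀ j : Int, a < j → j < (times.length : Int) → dp[j.toNat]? = some (pvSpec times k j)) →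
      ((PySem.List.pyRange a (-1) (-1)).foldl (fun (dp : List Int) i =>
        let ti := (PySem.List.pyGet? times i).getD 0
        let v := if (times.length : Int) - k - 1 ≤ i then ti
                 else ti + pvMinList (PySem.List.slice dp (some (i+1)) (some (i+k+2)))
        dp.set i.toNat v) dp).length = times.length ∧
      (∀ j : Int, -1 < j → j < (times.length : Int) →
        ((PySem.List.pyRange a (-1) (-1)).foldl (fun (dp : List Int) i =>
          let ti := (PySem.List.pyGet? times i).getD 0
          let v := if (times.length : Int) - k - 1 ≤ i then ti
                   else ti + pvMinList (PySem.List.slice dp (some (i+1)) (some (i+k+2)))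
          dp.set i.toNat v) dp)[j.toNat]? = some (pvSpec times k j)) := by
  have main : ∀ (m : Nat) (a : Int), (a+1).toNat ≤ m → a < (times.length : Int) →
      ∀ (dp : List Int), dp.length = times.length →
      (∀ j : Int, a < j → j < (times.length : Int) → dp[j.toNat]? = some (pvSpec times k j)) →
      ((PySem.List.pyRange a (-1) (-1)).foldl (fun (dp : List Int) i =>
        let ti := (PySem.List.pyGet? times i).getD 0
        let v := if (times.length : Int) - k - 1 ≤ i then ti
                 else ti + pvMinList (PySem.List.slice dp (some (i+1)) (some (i+k+2)))
        dp.set i.toNat v) dp).length = times.length ∧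
      (∀ j : Int, -1 < j → j < (times.length : Int) →
        ((PySem.List.pyRange a (-1) (-1)).foldl (fun (dp : List Int) i =>
          let ti := (PySem.List.pyGet? times i).getD 0
          let v := if (times.length : Int) - k - 1 ≤ i then ti
                   else ti + pvMinList (PySem.List.slice dp (some (i+1)) (some (i+k+2)))
          dp.set i.toNat v) dp)[j.toNat]? = some (pvSpec times k j)) := by
    intro m
    induction m with
    | zero =>
      intro a ha _ dp hlen hinv
      rw [PySem.List.pyRange_neg_one_eq_nil (by omega : a ≤ -1)]
      exact ⟨hlen, fun j h1 h2 => hinv j (by omega) h2⟩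
    | succ m ihm =>
      intro a ha haN dp hlen hinv
      by_cases ha0 : a ≤ -1
      · rw [PySem.List.pyRange_neg_one_eq_nil ha0]
        exact ⟨hlen, fun j h1 h2 => hinv j (by omega) h2⟩
      · rw [PySem.List.pyRange_neg_one_cons (by omega : -1 < a), List.foldl_cons]
        -- the value written at index a is pvSpec times k a
        have hv : (if (times.length : Int) - k - 1 ≤ a
              then (PySem.List.pyGet? times a).getD 0
              else (PySem.List.pyGet? times a).getD 0 +
                pvMinList (PySem.List.slice dp (some (a+1)) (some (a+k+2))))
            = pvSpec times k a := by
          by_cases htail : (times.length : Int) - k - 1 ≤ a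
          · rw [if_pos htail, pvSpec_tail times k a (by omega) htail]
          · rw [if_neg htail]
            have hslice : PySem.List.slice dp (some (a+1)) (some (a+k+2))
                = (PySem.List.pyRange (a+1) (a+k+2) 1).map (pvSpec times k) := by
              rw [PySem.List.slice_toNat dp (a := a+1) (b := a+k+2) (by omega) (by omega)]
              apply List.ext_getElem
              · simp only [List.length_take, List.length_drop, List.length_map,
                  PySem.List.length_pyRange_one, hlen]
                omega
              · intro d hd1 hd2
                simp only [List.getElem_take, List.getElem_drop]
                have hj := hinv (a+1+(d:Int)) (by omega) (by
                  simp only [List.length_take, List.length_drop] at hd1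
                  omega)
                obtain ⟨_, hval⟩ := List.getElem?_eq_some_iff.mp hj
                simp only [List.getElem_map, PySem.List.getElem_pyRange_one]
                rw [← hval]
                congr 1
                omega
            rw [hslice]
            have hcons : pvMinList ((PySem.List.pyRange (a+1) (a+k+2) 1).map (pvSpec times k))
                = ((PySem.List.pyRange (a+2) (a+k+2) 1).map (pvSpec times k)).foldl
                    min (pvSpec times k (a+1)) := by
              rw [PySem.List.pyRange_one_cons (by omega : a + 1 < a + k + 2), List.map_cons]
              have h2 : a + 1 + 1 = a + 2 := by ring
              rw [h2]
              rfl
            rw [hcons, pvSpec_nontail times k a (by omega) htail hk]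
        -- apply the induction hypothesis to the updated table
        have hstep := ihm (a-1) (by omega) (by omega)
          (dp.set a.toNat (if (times.length : Int) - k - 1 ≤ a
              then (PySem.List.pyGet? times a).getD 0
              else (PySem.List.pyGet? times a).getD 0 +
                pvMinList (PySem.List.slice dp (some (a+1)) (some (a+k+2)))))
          (by rw [List.length_set]; exact hlen)
          (by
            intro j h1 h2
            by_cases hja : j = a
            · subst hja
              rw [List.getElem?_set_self (by omega), hv]
            · rw [List.getElem?_set_ne (by omega)]
              exact hinv j (by omega) h2)
        exact hstep
  intro a haN dp hlen hinv
  exact main (a+1).toNat a le_rfl haN dp hlen hinv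

theorem pv_final (times : List Int) (k : Int) (hk : 0 ≤ k) :
    calculate_stops times k = calculate_stops_alt times k := by
  have hdp := pvDP_correct times k hk ((times.length : Int) - 1) (by omega)
    (List.replicate times.length 0) (by simp)
    (fun j h1 h2 => absurd h2 (by omega))
  obtain ⟨hlen, hval⟩ := hdp
  have halt : calculate_stops_alt times k
      = (if (times.length : Int) ≤ k
         then ((PySem.List.pyRange ((times.length : Int) - 1) (-1) (-1)).foldl
            (fun (dp : List Int) i =>
              let ti := (PySem.List.pyGet? times i).getD 0
              let v := if (times.length : Int) - k - 1 ≤ i then ti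
                       else ti + pvMinList (PySem.List.slice dp (some (i+1)) (some (i+k+2)))
              dp.set i.toNat v) (List.replicate times.length 0)).foldl min 0
         else pvMinList (PySem.List.slice
            ((PySem.List.pyRange ((times.length : Int) - 1) (-1) (-1)).foldl
            (fun (dp : List Int) i =>
              let ti := (PySem.List.pyGet? times i).getD 0
              let v := if (times.length : Int) - k - 1 ≤ i then ti
                       else ti + pvMinList (PySem.List.slice dp (some (i+1)) (some (i+k+2)))
              dp.set i.toNat v) (List.replicate times.length 0))
            (some 0) (some (k+1)))) := rfl
  rw [calculate_stops_eq_minspec times k hk, halt]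
  set dpF := (PySem.List.pyRange ((times.length : Int) - 1) (-1) (-1)).foldl
      (fun (dp : List Int) i =>
        let ti := (PySem.List.pyGet? times i).getD 0
        let v := if (times.length : Int) - k - 1 ≤ i then ti
                 else ti + pvMinList (PySem.List.slice dp (some (i+1)) (some (i+k+2)))
        dp.set i.toNat v) (List.replicate times.length 0) with hdpF
  by_cases hnk : (times.length : Int) ≤ k
  · rw [if_pos hnk]
    have hMle : ∀ j : Int, 0 ≤ j → j ≤ k →
        ((PySem.List.pyRange 1 (k+1) 1).map (pvSpec times k)).foldl min (pvSpec times k 0)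
          ≤ pvSpec times k j := by
      intro j h0 hjk
      rcases eq_or_lt_of_le h0 with h | h
      · rw [← h]
        exact (PySem.List.foldl_min_le _ _).1
      · refine (PySem.List.foldl_min_le _ _).2 _ ?_
        exact List.mem_map.mpr ⟨j, PySem.List.mem_pyRange_one.mpr ⟨by omega, by omega⟩, rfl⟩
    have hMmem : ∃ j : Int, 0 ≤ j ∧ j ≤ k ∧
        ((PySem.List.pyRange 1 (k+1) 1).map (pvSpec times k)).foldl min (pvSpec times k 0)
          = pvSpec times k j := by
      rcases PySem.List.foldl_min_mem ((PySem.List.pyRange 1 (k+1) 1).map (pvSpec times k))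
          (pvSpec times k 0) with h | h
      · exact ⟨0, le_rfl, hk, h⟩
      · obtain ⟨j, hjmem, hjeq⟩ := List.mem_map.mp h
        have hb := PySem.List.mem_pyRange_one.mp hjmem
        exact ⟨j, by omega, by omega, hjeq.symm⟩
    have hTle := PySem.List.foldl_min_le dpF 0
    have hTmem := PySem.List.foldl_min_mem dpF 0
    apply le_antisymm
    · rcases hTmem with h | h
      · rw [h]
        have h0 : pvSpec times k (times.length : Int) = 0 := pvSpec_of_ge times k _ le_rfl
        have := hMle (times.length : Int) (by omega) hnk
        omega
      · obtain ⟨idx, hidx, heq⟩ := List.mem_iff_getElem.mp h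
        have hidxn : (idx : Int) < (times.length : Int) := by
          rw [hlen] at hidx
          exact_mod_cast hidx
        have hv2 := hval (idx : Int) (by omega) hidxn
        rw [Int.toNat_natCast] at hv2
        obtain ⟨_, hveq⟩ := List.getElem?_eq_some_iff.mp hv2
        rw [← heq, hveq]
        exact hMle (idx : Int) (by omega) (by omega)
    · obtain ⟨j, hj0, hjk, hMj⟩ := hMmem
      rw [hMj]
      by_cases hjn : j < (times.length : Int)
      · have hj := hval j (by omega) hjn
        exact hTle.2 _ (List.mem_of_getElem? hj)
      · rw [pvSpec_of_ge times k j (by omega)]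
        exact hTle.1
  · rw [if_neg hnk]
    have hslice : PySem.List.slice dpF (some 0) (some (k+1))
        = (PySem.List.pyRange 0 (k+1) 1).map (pvSpec times k) := by
      rw [PySem.List.slice_toNat dpF (a := 0) (b := k+1) le_rfl (by omega)]
      apply List.ext_getElem
      · simp only [List.length_take, List.length_drop, List.length_map,
          PySem.List.length_pyRange_one, hlen]
        omega
      · intro d hd1 hd2
        simp only [List.getElem_take, List.getElem_drop]
        have hj := hval (d : Int) (by omega) (by
          simp only [List.length_take, List.length_drop, hlen] at hd1
          omega)
        obtain ⟨_, hveq⟩ := List.getElem?_eq_some_iff.mp hj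
        simp only [List.getElem_map, PySem.List.getElem_pyRange_one]
        have h0d : (0:Int) + (d:Int) = (d:Int) := by omega
        rw [h0d, ← hveq]
        congr 1
        omega
    rw [hslice, PySem.List.pyRange_one_cons (by omega : (0:Int) < k+1), List.map_cons]
    have h01 : (0:Int) + 1 = 1 := by norm_num
    rw [h01]
    rfl

-- ===== VERDICT (by name: the statement is the Claim_ definition above) =====
theorem calculate_stops_spec : Claim_equal_calculate_stops := by
  intro times k _ hk
  unfold Spec_calculate_stops
  exact pv_final times k hk
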